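-- pv_equiv track=rewrite | github.com/tantancansado/stock_analyzer_a | market_configs.py | get_european_market_for_ticker
-- ===== SOURCE A (Python) =====
-- def get_european_market_for_ticker(ticker: str) -> str:
--     """Retorna el mercado europeo al que pertenece un ticker"""
--     suffix_map = {
--         '.DE': 'DAX40',
--         '.L': 'FTSE100',
--         '.PA': 'CAC40',
--         '.MC': 'IBEX35',
--         '.AS': 'AEX25',
--         '.SW': 'SMI20',
--         '.MI': 'FTSEMIB',
--     }
--     for suffix, market in suffix_map.items():
--         if ticker.endswith(suffix):
--             return market
--     return 'OTHER'
-- ===== SOURCE B (Python) =====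
-- def get_european_market_for_ticker(ticker: str) -> str:
--     """Retorna el mercado europeo al que pertenece un ticker"""
--     suffix_map = {
--         '.DE': 'DAX40',
--         '.L': 'FTSE100',
--         '.PA': 'CAC40',
--         '.MC': 'IBEX35',
--         '.AS': 'AEX25',
--         '.SW': 'SMI20',
--         '.MI': 'FTSEMIB',
--     }
--     idx = ticker.rfind('.')
--     if idx == -1:
--         return 'OTHER'
--     return suffix_map.get(ticker[idx:], 'OTHER')
-- ===== Notes on version B (the rewrite author's own statement) =====
-- stated objective: idiomatic
-- what changed: B replaces the loop of 7 endswith scans with a single key extraction (suffix from the last '.', via rfind) and one dict lookup; the loop over the map disappears.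
import Mathlib
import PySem

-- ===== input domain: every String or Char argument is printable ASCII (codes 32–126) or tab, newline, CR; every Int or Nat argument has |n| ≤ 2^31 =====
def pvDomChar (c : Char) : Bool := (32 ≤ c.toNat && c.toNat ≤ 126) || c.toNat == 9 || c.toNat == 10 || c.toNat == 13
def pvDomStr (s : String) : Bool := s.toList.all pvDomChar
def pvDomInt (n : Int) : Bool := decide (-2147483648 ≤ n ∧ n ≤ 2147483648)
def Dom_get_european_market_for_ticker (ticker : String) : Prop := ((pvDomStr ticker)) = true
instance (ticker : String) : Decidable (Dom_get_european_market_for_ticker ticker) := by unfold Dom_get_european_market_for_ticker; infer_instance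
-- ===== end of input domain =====

-- B replaces A's loop of endswith tests by extracting the suffix from the last '.' (rfind) and
-- doing a single dict lookup — same values on every input, more idiomatic.

-- ===== PORT A =====
-- the dict literal A builds
def pvSuffixMapA : PySem.Dict String String :=
  PySem.Dict.ofList [(".DE", "DAX40"), (".L", "FTSE100"), (".PA", "CAC40"),
                     (".MC", "IBEX35"), (".AS", "AEX25"), (".SW", "SMI20"), (".MI", "FTSEMIB")]

-- 'for suffix, market in suffix_map.items(): if ticker.endswith(suffix): return market'
def pvLoopA (ticker : String) : List (String × String) → String
  | [] => "OTHER"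
  | (suffix, market) :: rest =>
      if PySem.Str.endswith ticker suffix then market else pvLoopA ticker rest

def get_european_market_for_ticker (ticker : String) : String :=
  pvLoopA ticker pvSuffixMapA.items

-- ===== PORT B =====
def pvSuffixMapB : PySem.Dict String String :=
  PySem.Dict.ofList [(".DE", "DAX40"), (".L", "FTSE100"), (".PA", "CAC40"),
                     (".MC", "IBEX35"), (".AS", "AEX25"), (".SW", "SMI20"), (".MI", "FTSEMIB")]

def get_european_market_for_ticker_alt (ticker : String) : String :=
  let idx := PySem.Str.rfind ticker "."
  if idx = -1 then "OTHER"
  else PySem.Dict.getD pvSuffixMapB (PySem.Str.slice ticker (some idx) none) "OTHER"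

-- ===== PRECONDITION & SPEC =====
def Spec_get_european_market_for_ticker (ticker : String) (out : String) : Prop := out = get_european_market_for_ticker_alt ticker
instance (ticker : String) (out : String) : Decidable (Spec_get_european_market_for_ticker ticker out) := by unfold Spec_get_european_market_for_ticker; infer_instance

-- ===== CLAIM (what is proved, stated in full; the proofs are below) =====
def Claim_equal_get_european_market_for_ticker : Prop := ∀ (ticker : String), Dom_get_european_market_for_ticker ticker → Spec_get_european_market_for_ticker ticker (get_european_market_for_ticker ticker)

-- ===== LEMMAS AND PROOFS =====

-- ['.'] is a prefix of l iff l starts with '.'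
lemma pv_dot_prefix (l : List Char) : (['.'].isPrefixOf l = true) ↔ ∃ t, l = '.' :: t := by
  cases l with
  | nil => simp [List.isPrefixOf]
  | cons a t =>
      simp only [List.isPrefixOf, Bool.and_true, beq_iff_eq, List.cons.injEq]
      constructor
      · intro h; exact ⟨t, h.symm, rfl⟩
      · rintro ⟨t', h1, h2⟩; subst h2; exact h1.symm

-- rfind.go returns -1 when there is no dot at all
lemma pv_go_no_dot (s : List Char) (h : '.' ∉ s) (j : Nat) :
    PySem.Chars.rfind.go s ['.'] j = -1 := by
  induction j with
  | zero =>
      have : ¬ (['.'].isPrefixOf s = true) := by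
        rw [pv_dot_prefix]; rintro ⟨t, rfl⟩; simp at h
      rw [PySem.Chars.rfind.go, if_neg this]
  | succ j ih =>
      have : ¬ (['.'].isPrefixOf (s.drop (j + 1)) = true) := by
        rw [pv_dot_prefix]; rintro ⟨t, ht⟩
        exact h (List.mem_of_mem_drop (show '.' ∈ s.drop (j + 1) by rw [ht]; simp))
      rw [PySem.Chars.rfind.go, if_neg this]
      exact ih

-- rfind.go returns the index of the last dot
lemma pv_go_last_dot (u v : List Char) (hv : '.' ∉ v) (j : Nat)
    (h1 : u.length ≤ j) (h2 : j ≤ (u ++ '.' :: v).length) :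
    PySem.Chars.rfind.go (u ++ '.' :: v) ['.'] j = (u.length : Int) := by
  induction j with
  | zero =>
      have hu : u.length = 0 := Nat.le_zero.mp h1
      have hu' : u = [] := List.length_eq_zero_iff.mp hu
      unfold PySem.Chars.rfind.go
      subst hu'
      simp [List.isPrefixOf]
  | succ j ih =>
      by_cases hj : j + 1 = u.length
      · unfold PySem.Chars.rfind.go
        have hdrop : (u ++ '.' :: v).drop (j + 1) = '.' :: v := by
          rw [hj, List.drop_left]
        rw [hdrop]
        simp [List.isPrefixOf, hj]
      · have hlt : u.length ≤ j := by omega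
        unfold PySem.Chars.rfind.go
        have hdrop : (u ++ '.' :: v).drop (j + 1) = v.drop (j - u.length) := by
          rw [List.drop_append]
          have : u.drop (j + 1) = [] := by
            apply List.drop_eq_nil_of_le; omega
          rw [this]
          have : j + 1 - u.length = (j - u.length) + 1 := by omega
          simp [this]
        have : ¬ (['.'].isPrefixOf ((u ++ '.' :: v).drop (j + 1)) = true) := by
          rw [pv_dot_prefix]; rintro ⟨t, ht⟩
          rw [hdrop] at ht
          exact hv (List.mem_of_mem_drop (show '.' ∈ v.drop (j - u.length) by rw [ht]; simp))
        rw [if_neg this]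
        exact ih hlt (by omega)

-- every string with a dot decomposes around its last dot
lemma pv_last_dot_decomp (s : List Char) (h : '.' ∈ s) :
    ∃ u v, s = u ++ '.' :: v ∧ '.' ∉ v := by
  induction s with
  | nil => simp at h
  | cons c t ih =>
      by_cases ht : '.' ∈ t
      · obtain ⟨u, v, rfl, hv⟩ := ih ht
        exact ⟨c :: u, v, rfl, hv⟩
      · have hc : c = '.' := by
          rcases List.mem_cons.mp h with h' | h'
          · exact h'.symm
          · exact absurd h' ht
        exact ⟨[], t, by rw [hc]; rfl, ht⟩

-- a suffix of the form '.'::w' (no later dot) is a suffix of s iff it IS the last-dot suffix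
lemma pv_suffix_char (u v w' : List Char) (hv : '.' ∉ v) (hw : '.' ∉ w') :
    (('.' :: w') <:+ (u ++ '.' :: v)) ↔ ('.' :: v = '.' :: w') := by
  constructor
  · intro hsuf
    have hsv : ('.' :: v) <:+ (u ++ '.' :: v) := ⟨u, rfl⟩
    rcases List.suffix_or_suffix_of_suffix hsuf hsv with h | h
    · rcases List.suffix_cons_iff.mp h with h' | h'
      · exact h'.symm
      · exact absurd (h'.mem (by simp)) hv
    · rcases List.suffix_cons_iff.mp h with h' | h'
      · exact h'
      · exact absurd (h'.mem (by simp)) hw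
  · rintro h
    exact ⟨u, by rw [← h]⟩

-- ===== VERDICT (by name: the statement is the Claim_ definition above) =====
theorem get_european_market_for_ticker_spec : Claim_equal_get_european_market_for_ticker := by
  intro ticker _
  unfold Spec_get_european_market_for_ticker
  unfold get_european_market_for_ticker get_european_market_for_ticker_alt
  simp only [PySem.Str.rfind_eq]
  rw [show ("." : String).toList = ['.'] from rfl]
  by_cases hdot : '.' ∈ ticker.toList
  · obtain ⟨u, v, hs, hv⟩ := pv_last_dot_decomp ticker.toList hdot
    have hrf : PySem.Chars.rfind ticker.toList ['.'] = (u.length : Int) := by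
      show PySem.Chars.rfind.go ticker.toList ['.'] ticker.toList.length = _
      rw [hs]
      exact pv_go_last_dot u v hv _ (by simp) (le_refl _)
    have hslice : PySem.Str.slice ticker (some ((u.length : Int))) none
        = String.ofList ('.' :: v) := by
      simp only [PySem.Str.slice]
      congr 1
      rw [PySem.Chars.slice_eq_listSlice, PySem.List.slice_from_natCast, hs, List.drop_left]
    have hne : ¬ ((u.length : Int) = -1) := by omega
    rw [hrf]
    rw [if_neg hne, hslice]
    have hend : ∀ w' : List Char, '.' ∉ w' →
        (PySem.Str.endswith ticker (String.ofList ('.' :: w')) = true ↔ v = w') := by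
      intro w' hw
      rw [PySem.Str.endswith_eq]
      rw [PySem.Chars.endswith_iff]
      simp only [String.toList_ofList]
      rw [hs, pv_suffix_char u v w' hv hw]
      simp
    -- decide which of the 7 suffix tails v equals (if any)
    rw [show pvSuffixMapA.items = [(".DE", "DAX40"), (".L", "FTSE100"), (".PA", "CAC40"),
         (".MC", "IBEX35"), (".AS", "AEX25"), (".SW", "SMI20"), (".MI", "FTSEMIB")] from by decide]
    simp only [pvLoopA]
    have e1 : PySem.Str.endswith ticker ".DE" = true ↔ v = ['D','E'] := hend ['D','E'] (by decide)
    have e2 : PySem.Str.endswith ticker ".L" = true ↔ v = ['L'] := hend ['L'] (by decide)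
    have e3 : PySem.Str.endswith ticker ".PA" = true ↔ v = ['P','A'] := hend ['P','A'] (by decide)
    have e4 : PySem.Str.endswith ticker ".MC" = true ↔ v = ['M','C'] := hend ['M','C'] (by decide)
    have e5 : PySem.Str.endswith ticker ".AS" = true ↔ v = ['A','S'] := hend ['A','S'] (by decide)
    have e6 : PySem.Str.endswith ticker ".SW" = true ↔ v = ['S','W'] := hend ['S','W'] (by decide)
    have e7 : PySem.Str.endswith ticker ".MI" = true ↔ v = ['M','I'] := hend ['M','I'] (by decide)
    by_cases h1 : v = ['D','E']
    · rw [if_pos (e1.mpr h1)]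
      rw [h1]
      decide
    by_cases h2 : v = ['L']
    · rw [if_neg (fun hc => h1 (e1.mp hc)), if_pos (e2.mpr h2)]
      rw [h2]
      decide
    by_cases h3 : v = ['P','A']
    · rw [if_neg (fun hc => h1 (e1.mp hc)), if_neg (fun hc => h2 (e2.mp hc)), if_pos (e3.mpr h3)]
      rw [h3]
      decide
    by_cases h4 : v = ['M','C']
    · rw [if_neg (fun hc => h1 (e1.mp hc)), if_neg (fun hc => h2 (e2.mp hc)), if_neg (fun hc => h3 (e3.mp hc)), if_pos (e4.mpr h4)]
      rw [h4]
      decide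
    by_cases h5 : v = ['A','S']
    · rw [if_neg (fun hc => h1 (e1.mp hc)), if_neg (fun hc => h2 (e2.mp hc)), if_neg (fun hc => h3 (e3.mp hc)), if_neg (fun hc => h4 (e4.mp hc)), if_pos (e5.mpr h5)]
      rw [h5]
      decide
    by_cases h6 : v = ['S','W']
    · rw [if_neg (fun hc => h1 (e1.mp hc)), if_neg (fun hc => h2 (e2.mp hc)), if_neg (fun hc => h3 (e3.mp hc)), if_neg (fun hc => h4 (e4.mp hc)), if_neg (fun hc => h5 (e5.mp hc)), if_pos (e6.mpr h6)]
      rw [h6]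
      decide
    by_cases h7 : v = ['M','I']
    · rw [if_neg (fun hc => h1 (e1.mp hc)), if_neg (fun hc => h2 (e2.mp hc)), if_neg (fun hc => h3 (e3.mp hc)), if_neg (fun hc => h4 (e4.mp hc)), if_neg (fun hc => h5 (e5.mp hc)), if_neg (fun hc => h6 (e6.mp hc)), if_pos (e7.mpr h7)]
      rw [h7]
      decide
    · -- no key matches: both sides are 'OTHER'
      rw [if_neg (fun hc => h1 (e1.mp hc)), if_neg (fun hc => h2 (e2.mp hc)), if_neg (fun hc => h3 (e3.mp hc)), if_neg (fun hc => h4 (e4.mp hc)), if_neg (fun hc => h5 (e5.mp hc)), if_neg (fun hc => h6 (e6.mp hc)), if_neg (fun hc => h7 (e7.mp hc))]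
      have n1 : ¬ ((".DE" : String) = String.ofList ('.' :: v)) := by
        intro hk; apply h1
        have := congrArg String.toList hk
        simp at this
        exact this.symm
      have n2 : ¬ ((".L" : String) = String.ofList ('.' :: v)) := by
        intro hk; apply h2
        have := congrArg String.toList hk
        simp at this
        exact this.symm
      have n3 : ¬ ((".PA" : String) = String.ofList ('.' :: v)) := by
        intro hk; apply h3
        have := congrArg String.toList hk
        simp at this
        exact this.symm
      have n4 : ¬ ((".MC" : String) = String.ofList ('.' :: v)) := by
        intro hk; apply h4
        have := congrArg String.toList hk
        simp at this
        exact this.symm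
      have n5 : ¬ ((".AS" : String) = String.ofList ('.' :: v)) := by
        intro hk; apply h5
        have := congrArg String.toList hk
        simp at this
        exact this.symm
      have n6 : ¬ ((".SW" : String) = String.ofList ('.' :: v)) := by
        intro hk; apply h6
        have := congrArg String.toList hk
        simp at this
        exact this.symm
      have n7 : ¬ ((".MI" : String) = String.ofList ('.' :: v)) := by
        intro hk; apply h7
        have := congrArg String.toList hk
        simp at this
        exact this.symm
      rw [show pvSuffixMapB = PySem.Dict.mk [(".DE", "DAX40"), (".L", "FTSE100"), (".PA", "CAC40"),
           (".MC", "IBEX35"), (".AS", "AEX25"), (".SW", "SMI20"), (".MI", "FTSEMIB")] from by decide]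
      simp [PySem.Dict.getD, PySem.Dict.get?, n1, n2, n3, n4, n5, n6, n7]
  · have hrf : PySem.Chars.rfind ticker.toList ['.'] = -1 :=
      pv_go_no_dot ticker.toList hdot _
    rw [hrf]
    rw [if_pos rfl]
    have hend : ∀ p : String, '.' ∈ p.toList → PySem.Str.endswith ticker p = false := by
      intro p hp
      rw [PySem.Str.endswith_eq]
      rw [Bool.eq_false_iff]
      intro hc
      rw [PySem.Chars.endswith_iff] at hc
      exact hdot (hc.mem hp)
    rw [show pvSuffixMapA.items = [(".DE", "DAX40"), (".L", "FTSE100"), (".PA", "CAC40"),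
         (".MC", "IBEX35"), (".AS", "AEX25"), (".SW", "SMI20"), (".MI", "FTSEMIB")] from by decide]
    simp only [pvLoopA]
    rw [hend ".DE" (by decide), hend ".L" (by decide), hend ".PA" (by decide),
        hend ".MC" (by decide), hend ".AS" (by decide), hend ".SW" (by decide),
        hend ".MI" (by decide)]
    rfl
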